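-- pv_equiv track=rewrite | github.com/gustavokuklinski/bit-rot | core/map/world_layers.py | resize_map_layer
-- ===== SOURCE A (Python) =====
-- def resize_map_layer(layer_data, target_width, target_height, fill_value=''):
--     """
--     Resizes a map layer to the target dimensions.
--     - Pads with `fill_value` if smaller.
--     - Trims if larger.
--     """
--     current_height = len(layer_data)
--
--     # --- START FIX ---
--     # Create a new blank layer with the target dimensions
--     new_layer = [[fill_value for _ in range(target_width)] for _ in range(target_height)]
--
--     # We must iterate over each row individually, as they may have
--     # different lengths (sparse CSV).
--
--     # Loop over the rows we want to *copy*
--     for y in range(min(current_height, target_height)):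
--
--         # Get the actual width of the *current* row
--         current_row_width = len(layer_data[y])
--
--         # Loop over the columns we want to *copy*
--         # This will copy up to `current_row_width` or `target_width`,
--         # whichever is smaller.
--         for x in range(min(current_row_width, target_width)):
--             # Just copy the data.
--             new_layer[y][x] = layer_data[y][x]
--
--     return new_layer
-- ===== SOURCE B (Python) =====
-- def resize_map_layer(layer_data, target_width, target_height, fill_value=''):
--     # Column-major construction: build each output column by probing the source
--     # grid with bounds checks, then transpose columns back into rows.
--     if target_height <= 0:
--         return []
--     columns = []
--     for x in range(target_width):
--         column = []
--         for y in range(target_height):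
--             if y < len(layer_data) and x < len(layer_data[y]):
--                 column.append(layer_data[y][x])
--             else:
--                 column.append(fill_value)
--         columns.append(column)
--     return [[columns[x][y] for x in range(len(columns))] for y in range(target_height)]
-- ===== Notes on version B (the rewrite author's own statement) =====
-- stated objective: alternative
-- what changed: B constructs the resized grid column-major (each output column gathered cell-by-cell with bounds checks against the ragged source) and then transposes the column list back into rows, instead of A's preallocating a blank row-major grid and overwriting the overlapping cells in a nested row/column assignment loop.
import Mathlib
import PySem

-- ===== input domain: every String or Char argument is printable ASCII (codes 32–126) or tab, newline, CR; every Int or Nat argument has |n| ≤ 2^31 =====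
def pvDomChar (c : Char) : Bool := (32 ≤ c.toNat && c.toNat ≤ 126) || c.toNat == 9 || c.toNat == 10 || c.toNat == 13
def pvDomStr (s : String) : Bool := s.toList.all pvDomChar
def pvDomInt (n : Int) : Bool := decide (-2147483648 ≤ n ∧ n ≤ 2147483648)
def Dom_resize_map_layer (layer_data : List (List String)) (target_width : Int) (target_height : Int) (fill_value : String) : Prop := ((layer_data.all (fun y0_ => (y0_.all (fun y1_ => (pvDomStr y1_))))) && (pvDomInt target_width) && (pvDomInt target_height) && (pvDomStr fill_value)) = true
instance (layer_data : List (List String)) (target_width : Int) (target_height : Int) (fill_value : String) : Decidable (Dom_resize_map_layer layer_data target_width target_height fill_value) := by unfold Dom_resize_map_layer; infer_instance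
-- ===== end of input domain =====

-- B builds the resized grid column-major (each output column probed cell-by-cell with
-- bounds checks) and transposes it back into rows, instead of A's preallocate-blank-
-- row-grid-then-overwrite; objective: alternative traversal order, same cost.

-- ===== PORT A =====
def resize_map_layer (layer_data : List (List String)) (target_width : Int) (target_height : Int) (fill_value : String) : List (List String) :=
  let current_height : Int := layer_data.length
  let new_layer : List (List String) :=
    (PySem.List.pyRange 0 target_height 1).map (fun _ =>
      (PySem.List.pyRange 0 target_width 1).map (fun _ => fill_value))
  (PySem.List.pyRange 0 (min current_height target_height) 1).foldl (fun nl y =>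
    let current_row_width : Int := (PySem.List.pyGetD layer_data y []).length
    (PySem.List.pyRange 0 (min current_row_width target_width) 1).foldl (fun nl2 x =>
      PySem.List.pySetD nl2 y
        (PySem.List.pySetD (PySem.List.pyGetD nl2 y []) x
          (PySem.List.pyGetD (PySem.List.pyGetD layer_data y []) x ""))) nl) new_layer

-- ===== PORT B =====
def resize_map_layer_alt (layer_data : List (List String)) (target_width : Int) (target_height : Int) (fill_value : String) : List (List String) :=
  if target_height ≤ 0 then [] else
  let columns : List (List String) :=
    (PySem.List.pyRange 0 target_width 1).foldl (fun cols x =>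
      cols ++ [(PySem.List.pyRange 0 target_height 1).foldl (fun col y =>
        col ++ [if y < (layer_data.length : Int) ∧
                   x < ((PySem.List.pyGetD layer_data y []).length : Int) then
                  PySem.List.pyGetD (PySem.List.pyGetD layer_data y []) x ""
                else fill_value]) []]) []
  (PySem.List.pyRange 0 target_height 1).map (fun y =>
    (PySem.List.pyRange 0 (columns.length : Int) 1).map (fun x =>
      PySem.List.pyGetD (PySem.List.pyGetD columns x []) y ""))

-- ===== PRECONDITION & SPEC =====
def Spec_resize_map_layer (layer_data : List (List String)) (target_width : Int) (target_height : Int) (fill_value : String) (out : List (List String)) : Prop := out = resize_map_layer_alt layer_data target_width target_height fill_value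
instance (layer_data : List (List String)) (target_width : Int) (target_height : Int) (fill_value : String) (out : List (List String)) : Decidable (Spec_resize_map_layer layer_data target_width target_height fill_value out) := by unfold Spec_resize_map_layer; infer_instance

-- ===== CLAIM (what is proved, stated in full; the proofs are below) =====
def Claim_equal_resize_map_layer : Prop := ∀ (layer_data : List (List String)) (target_width : Int) (target_height : Int) (fill_value : String), Dom_resize_map_layer layer_data target_width target_height fill_value → Spec_resize_map_layer layer_data target_width target_height fill_value (resize_map_layer layer_data target_width target_height fill_value)

-- ===== LEMMAS AND PROOFS =====

-- the canonical value of either program: cell (y,x) is the source cell when in range, else fill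
def pvCell (layer_data : List (List String)) (fv : String) (y x : Nat) : String :=
  if y < layer_data.length ∧ x < (layer_data.getD y []).length then
    (layer_data.getD y []).getD x "" else fv

def pvCanon (layer_data : List (List String)) (tw th : Int) (fv : String) : List (List String) :=
  (List.range th.toNat).map (fun y => (List.range tw.toNat).map (fun x => pvCell layer_data fv y x))

lemma row_fold (v : Nat → String) (fill : String) (W m : Nat) (hm : m ≤ W) :
    (List.range m).foldl (fun r x => r.set x (v x)) (List.replicate W fill)
      = (List.range m).map v ++ List.replicate (W - m) fill := by
  induction m with
  | zero => simp
  | succ n ih =>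
    rw [List.range_succ, List.foldl_append, ih (by omega)]
    simp only [List.foldl_cons, List.foldl_nil, List.map_append, List.map_cons,
      List.map_nil, List.append_assoc]
    apply List.ext_getElem
    · simp; omega
    · intro j hj1 hj2
      simp only [List.getElem_set, List.getElem_append, List.length_map, List.length_range,
        List.getElem_map, List.getElem_range, List.getElem_replicate,
        List.length_cons, List.getElem_cons, List.length_nil]
      split_ifs <;> first | rfl | omega

lemma getD_set_self (l : List (List String)) (n : Nat) (h : n < l.length) (v d : List String) :
    (l.set n v).getD n d = v := by
  simp [List.getD_eq_getElem?_getD]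
  rw [List.getElem?_set]
  simp [h]

-- the inner fold acts only on row y of the grid
lemma grid_inner (y : Nat) (v : Nat → String) (m : Nat) (nl : List (List String)) (hy : y < nl.length) :
    (List.range m).foldl (fun nl2 x => nl2.set y ((nl2.getD y []).set x (v x))) nl
      = nl.set y ((List.range m).foldl (fun r x => r.set x (v x)) (nl.getD y [])) := by
  induction m with
  | zero =>
    simp only [List.range_zero, List.foldl_nil]
    have : nl.getD y [] = nl[y] := by
      simp [List.getD_eq_getElem?_getD, List.getElem?_eq_getElem hy]
    rw [this]
    exact (List.set_getElem_self hy).symm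
  | succ n ih =>
    rw [List.range_succ, List.foldl_append, List.foldl_append, List.foldl_cons, List.foldl_nil,
        List.foldl_cons, List.foldl_nil, ih, getD_set_self _ _ hy, List.set_set]

-- the outer fold over a replicated blank grid, each step being the inner per-row fold
lemma grid_outer (v : Nat → Nat → String) (M : Nat → Nat) (blank : List String) (K N : Nat)
    (hK : K ≤ N) :
    (List.range K).foldl (fun nl y =>
        (List.range (M y)).foldl (fun nl2 x => nl2.set y ((nl2.getD y []).set x (v y x))) nl)
      (List.replicate N blank)
      = (List.range N).map (fun y =>
          if y < K then (List.range (M y)).foldl (fun r x => r.set x (v y x)) blank else blank) := by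
  induction K with
  | zero => simp [List.map_const']
  | succ n ih =>
    rw [List.range_succ, List.foldl_append, List.foldl_cons, List.foldl_nil, ih (by omega),
        grid_inner n (v n) (M n) _ (by simp; omega)]
    have hgd : ((List.range N).map (fun y => if y < n then (List.range (M y)).foldl (fun r x => r.set x (v y x)) blank else blank)).getD n [] = blank := by
      simp [List.getD_eq_getElem?_getD, List.getElem?_map, List.getElem?_range (show n < N by omega)]
    rw [hgd]
    apply List.ext_getElem
    · simp
    · intro j hj1 hj2
      simp only [List.length_set, List.length_map, List.length_range] at hj1 hj2
      simp only [List.getElem_set, List.getElem_map, List.getElem_range]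
      split_ifs <;> first | rfl | omega | (subst_vars; rfl)

lemma a_eq_canon (layer_data : List (List String)) (tw th : Int) (fv : String) :
    resize_map_layer layer_data tw th fv = pvCanon layer_data tw th fv := by
  unfold resize_map_layer pvCanon
  simp only [PySem.List.pyRange_one, Int.sub_zero, Int.zero_add, List.foldl_map, List.map_map,
    Function.comp_def, PySem.List.pyGetD_natCast, PySem.List.pySetD_natCast, List.map_const']
  simp only [List.length_range]
  rw [grid_outer (fun y x => (layer_data.getD y []).getD x "")
        (fun y => (min (((layer_data.getD y []).length : Int)) tw).toNat)
        (List.replicate tw.toNat fv) _ _ (by omega)]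
  apply List.map_congr_left
  intro y hy
  simp only [List.mem_range] at hy
  by_cases hc : y < layer_data.length
  · rw [if_pos (by omega), row_fold _ _ _ _ (by omega)]
    apply List.ext_getElem
    · simp
    · intro j hj1 hj2
      simp only [List.length_append, List.length_map, List.length_range,
        List.length_replicate] at hj1 hj2
      simp only [List.getElem_append, List.length_map, List.length_range, List.getElem_map,
        List.getElem_range, List.getElem_replicate, pvCell]
      split_ifs <;> first | rfl | omega
  · rw [if_neg (by omega)]
    apply List.ext_getElem
    · simp
    · intro j hj1 hj2
      simp only [List.getElem_replicate, List.getElem_map, List.getElem_range, pvCell]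
      rw [if_neg (by omega)]

lemma b_eq_canon (layer_data : List (List String)) (tw th : Int) (fv : String) :
    resize_map_layer_alt layer_data tw th fv = pvCanon layer_data tw th fv := by
  unfold resize_map_layer_alt pvCanon
  by_cases hth : th ≤ 0
  · rw [if_pos hth]
    have : th.toNat = 0 := by omega
    simp [this]
  rw [if_neg hth]
  simp only [PySem.List.pyRange_one, Int.sub_zero, Int.zero_add, List.foldl_map, List.map_map,
    Function.comp_def, PySem.List.foldl_append_singleton_eq_map, List.nil_append,
    PySem.List.pyGetD_natCast, Nat.cast_lt, List.length_map, List.length_range,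
    Int.toNat_natCast]
  apply List.map_congr_left
  intro y hy
  simp only [List.mem_range] at hy
  apply List.map_congr_left
  intro x hx
  simp only [List.mem_range] at hx
  simp only [List.getD_eq_getElem?_getD, List.getElem?_map, List.getElem?_range hx,
    List.getElem?_range hy, Option.map_some, Option.getD_some]
  simp [pvCell]

-- ===== VERDICT (by name: the statement is the Claim_ definition above) =====
theorem resize_map_layer_spec : Claim_equal_resize_map_layer := by
  intro layer_data tw th fv _
  unfold Spec_resize_map_layer
  rw [a_eq_canon, b_eq_canon]
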